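-- pv_equiv track=rewrite | github.com/apullin/llvm-8085 | tooling/exact_alloc_probe.py | block_use_def
-- ===== SOURCE A (Python) =====
-- def block_use_def(parsed: dict[int, list[dict[str, object]]]):
--     bdef: dict[int, set[int]] = {}
--     buse: dict[int, set[int]] = {}
--     for b, ins in parsed.items():
--         seen: set[int] = set()
--         defs: set[int] = set()
--         uses: set[int] = set()
--         for item in ins:
--             inst_defs = item["defs"]  # type: ignore[assignment]
--             inst_uses = item["uses"]  # type: ignore[assignment]
--             for u in inst_uses:
--                 if u not in seen:
--                     uses.add(u)
--             for d in inst_defs: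
--                 seen.add(d)
--                 defs.add(d)
--         bdef[b] = defs
--         buse[b] = uses
--     return bdef, buse
-- ===== SOURCE B (Python) =====
-- def block_use_def(parsed: dict[int, list[dict[str, object]]]):
--     bdef: dict[int, set[int]] = {}
--     buse: dict[int, set[int]] = {}
--     for b, ins in parsed.items():
--         flat_defs = [d for it in ins for d in it["defs"]]
--         first_def: dict[int, int] = {}
--         for i, it in enumerate(ins):
--             for d in it["defs"]:
--                 if d not in first_def:
--                     first_def[d] = i
--         n = len(ins)
--         bdef[b] = set(flat_defs)
--         buse[b] = set(u for i, it in enumerate(ins)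
--                         for u in it["uses"]
--                         if first_def.get(u, n) >= i)
--     return bdef, buse
-- ===== Notes on version B (the rewrite author's own statement) =====
-- stated objective: alternative
-- what changed: A keeps a mutating 'seen' set and grows defs/uses sets instruction by instruction; B instead builds a first-definition index map per block and then computes bdef as one flattened set and buse as one stateless filtered comprehension over enumerate(ins), comparing each use's first-def index against its instruction index.
import Mathlib
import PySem

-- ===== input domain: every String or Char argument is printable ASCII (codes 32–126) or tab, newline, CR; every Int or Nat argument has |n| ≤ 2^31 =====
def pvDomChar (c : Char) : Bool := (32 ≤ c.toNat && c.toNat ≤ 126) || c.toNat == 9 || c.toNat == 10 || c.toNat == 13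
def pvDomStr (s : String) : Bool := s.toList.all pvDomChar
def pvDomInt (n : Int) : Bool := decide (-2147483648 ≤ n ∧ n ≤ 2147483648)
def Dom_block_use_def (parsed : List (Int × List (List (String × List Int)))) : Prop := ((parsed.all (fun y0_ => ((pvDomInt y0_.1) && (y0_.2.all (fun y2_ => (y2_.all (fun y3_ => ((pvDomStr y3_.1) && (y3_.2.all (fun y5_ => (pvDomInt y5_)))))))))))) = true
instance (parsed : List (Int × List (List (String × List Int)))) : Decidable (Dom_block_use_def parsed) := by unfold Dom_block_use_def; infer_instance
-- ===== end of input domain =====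

-- B replaces A's stateful seen/defs/uses loop by a first-definition index map plus stateless
-- filtered flattenings (objective: alternative decomposition, same asymptotic cost).

-- item["defs"] / item["uses"] on the instruction dict (shared accessor helpers)
def defsOf (it : List (String × List Int)) : List Int :=
  PySem.Dict.getD (PySem.Dict.mk it) "defs" []
def usesOf (it : List (String × List Int)) : List Int :=
  PySem.Dict.getD (PySem.Dict.mk it) "uses" []

-- ===== PORT A =====
def block_use_def (parsed : List (Int × List (List (String × List Int)))) : (List (Int × List Int)) × (List (Int × List Int)) :=
  let r := parsed.foldl
    (fun (acc : PySem.Dict Int (List Int) × PySem.Dict Int (List Int)) bi =>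
      let fin := bi.2.foldl
        (fun (st : List Int × List Int × List Int) item =>
          let instDefs := defsOf item
          let instUses := usesOf item
          let uses' := instUses.foldl
            (fun us u => if PySem.Set.contains st.1 u then us else PySem.Set.add us u) st.2.2
          let sd := instDefs.foldl
            (fun (p : List Int × List Int) d => (PySem.Set.add p.1 d, PySem.Set.add p.2 d))
            (st.1, st.2.1)
          (sd.1, sd.2, uses'))
        (([] : List Int), ([] : List Int), ([] : List Int))
      (PySem.Dict.insert acc.1 bi.1 fin.2.1, PySem.Dict.insert acc.2 bi.1 fin.2.2))
    (PySem.Dict.empty, PySem.Dict.empty)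
  (r.1.items, r.2.items)

-- ===== PORT B =====
def block_use_def_alt (parsed : List (Int × List (List (String × List Int)))) : (List (Int × List Int)) × (List (Int × List Int)) :=
  let r := parsed.foldl
    (fun (acc : PySem.Dict Int (List Int) × PySem.Dict Int (List Int)) bi =>
      let ins := bi.2
      let flatDefs := ins.flatMap (fun it => defsOf it)
      let firstDef := (PySem.List.enumerate ins).foldl
        (fun (fd : PySem.Dict Int Int) p =>
          (defsOf p.2).foldl
            (fun fd d => if PySem.Dict.contains fd d then fd else PySem.Dict.insert fd d p.1) fd)
        PySem.Dict.empty
      let n : Int := ins.length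
      (PySem.Dict.insert acc.1 bi.1 (PySem.Set.ofList flatDefs),
       PySem.Dict.insert acc.2 bi.1 (PySem.Set.ofList
         ((PySem.List.enumerate ins).flatMap (fun p =>
           (usesOf p.2).filter (fun u => decide (PySem.Dict.getD firstDef u n ≥ p.1)))))))
    (PySem.Dict.empty, PySem.Dict.empty)
  (r.1.items, r.2.items)

-- ===== PRECONDITION & SPEC =====
-- Pre_ excludes exactly the inputs where some instruction dict lacks a "defs" or "uses" key:
-- there Python A raises KeyError and returns nothing.
def Pre_block_use_def (parsed : List (Int × List (List (String × List Int)))) : Prop :=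
  (parsed.all (fun bi => bi.2.all (fun it =>
    PySem.Dict.contains (PySem.Dict.mk it) "defs" && PySem.Dict.contains (PySem.Dict.mk it) "uses"))) = true
instance (parsed : List (Int × List (List (String × List Int)))) : Decidable (Pre_block_use_def parsed) := by unfold Pre_block_use_def; infer_instance

def pvWitness_block_use_def : (List (Int × List (List (String × List Int)))) :=
  [(0, [[("defs", [1]), ("uses", [2, 1])], [("defs", [2]), ("uses", [1, 3])]]), (1, [])]

def Spec_block_use_def (parsed : List (Int × List (List (String × List Int)))) (out : (List (Int × List Int)) × (List (Int × List Int))) : Prop := out = block_use_def_alt parsed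
instance (parsed : List (Int × List (List (String × List Int)))) (out : (List (Int × List Int)) × (List (Int × List Int))) : Decidable (Spec_block_use_def parsed out) := by unfold Spec_block_use_def; infer_instance

-- ===== CLAIM (what is proved, stated in full; the proofs are below) =====
def Claim_equal_block_use_def : Prop := ∀ (parsed : List (Int × List (List (String × List Int)))), Dom_block_use_def parsed → Pre_block_use_def parsed → Spec_block_use_def parsed (block_use_def parsed)

-- ===== LEMMAS AND PROOFS =====

-- the qualifying (upward-exposed) uses of a block, in A's traversal order, given the defs seen so far
def selA (seen : List Int) : List (List (String × List Int)) → List Int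
  | [] => []
  | it :: rest =>
      (usesOf it).filter (fun u => !PySem.Set.contains seen u)
        ++ selA (PySem.Set.update seen (defsOf it)) rest

-- B's inner loops as structural recursions
def addDefs (fd : PySem.Dict Int Int) (i : Int) (ds : List Int) : PySem.Dict Int Int :=
  ds.foldl (fun fd d => if PySem.Dict.contains fd d then fd else PySem.Dict.insert fd d i) fd

def buildFdFrom (fd : PySem.Dict Int Int) (i : Int) : List (List (String × List Int)) → PySem.Dict Int Int
  | [] => fd
  | it :: rest => buildFdFrom (addDefs fd i (defsOf it)) (i + 1) rest

def filtB (fd : PySem.Dict Int Int) (n : Int) (i : Int) : List (List (String × List Int)) → List Int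
  | [] => []
  | it :: rest =>
      (usesOf it).filter (fun u => decide (PySem.Dict.getD fd u n ≥ i)) ++ filtB fd n (i + 1) rest

theorem enum_foldl_eq_buildFdFrom (ins : List (List (String × List Int))) :
    ∀ (fd : PySem.Dict Int Int) (i : Int),
      (PySem.List.enumerate ins i).foldl
        (fun (fd : PySem.Dict Int Int) p =>
          (defsOf p.2).foldl
            (fun fd d => if PySem.Dict.contains fd d then fd else PySem.Dict.insert fd d p.1) fd)
        fd = buildFdFrom fd i ins := by
  induction ins with
  | nil => intro fd i; simp [PySem.List.enumerate, buildFdFrom]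
  | cons it rest ih =>
      intro fd i
      rw [PySem.List.enumerate_cons]
      simp only [List.foldl_cons, buildFdFrom]
      exact ih _ _

theorem enum_flatMap_eq_filtB (ins : List (List (String × List Int))) :
    ∀ (fd : PySem.Dict Int Int) (n i : Int),
      (PySem.List.enumerate ins i).flatMap (fun p =>
        (usesOf p.2).filter (fun u => decide (PySem.Dict.getD fd u n ≥ p.1)))
        = filtB fd n i ins := by
  induction ins with
  | nil => intro fd n i; simp [PySem.List.enumerate, filtB]
  | cons it rest ih =>
      intro fd n i
      rw [PySem.List.enumerate_cons]
      simp only [List.flatMap_cons, filtB]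
      rw [ih]

theorem uses_foldl_eq_update (l : List Int) (seen : List Int) :
    ∀ uses : List Int,
      l.foldl (fun us u => if PySem.Set.contains seen u then us else PySem.Set.add us u) uses
        = PySem.Set.update uses (l.filter (fun u => !PySem.Set.contains seen u)) := by
  induction l with
  | nil => intro uses; simp [PySem.Set.update]
  | cons x xs ih =>
      intro uses
      simp only [List.foldl_cons, List.filter_cons]
      rw [ih]
      by_cases h : PySem.Set.contains seen x = true
      · simp only [h, if_true, Bool.not_true, Bool.false_eq_true, if_false]
      · simp only [Bool.not_eq_true] at h
        simp only [h, Bool.false_eq_true, if_false, Bool.not_false, if_true]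
        rw [PySem.Set.update_cons]

theorem innerA_eq (ins : List (List (String × List Int))) :
    ∀ (seen defs uses : List Int),
      ins.foldl
        (fun (st : List Int × List Int × List Int) item =>
          let instDefs := defsOf item
          let instUses := usesOf item
          let uses' := instUses.foldl
            (fun us u => if PySem.Set.contains st.1 u then us else PySem.Set.add us u) st.2.2
          let sd := instDefs.foldl
            (fun (p : List Int × List Int) d => (PySem.Set.add p.1 d, PySem.Set.add p.2 d))
            (st.1, st.2.1)
          (sd.1, sd.2, uses'))
        (seen, defs, uses)
      = (PySem.Set.update seen (ins.flatMap (fun it => defsOf it)),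
         PySem.Set.update defs (ins.flatMap (fun it => defsOf it)),
         PySem.Set.update uses (selA seen ins)) := by
  induction ins with
  | nil => intro seen defs uses; simp [selA, PySem.Set.update]
  | cons it rest ih =>
      intro seen defs uses
      simp only [List.foldl_cons]
      rw [PySem.List.foldl_prod_mk (f := PySem.Set.add) (g := PySem.Set.add)]
      rw [uses_foldl_eq_update]
      rw [ih]
      simp only [List.flatMap_cons, selA, PySem.Set.update_append]
      rfl

theorem addDefs_get?_some (ds : List Int) :
    ∀ (fd : PySem.Dict Int Int) (i u v : Int),
      (addDefs fd i ds).get? u = some v → fd.get? u = some v ∨ v = i := by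
  induction ds with
  | nil => intro fd i u v h; exact Or.inl h
  | cons d ds ih =>
      intro fd i u v h
      rcases ih _ i u v h with h' | h'
      · beta_reduce at h'
        by_cases hc : PySem.Dict.contains fd d = true
        · rw [if_pos hc] at h'; exact Or.inl h'
        · rw [if_neg hc, PySem.Dict.get?_insert] at h'
          split_ifs at h' with he
          · exact Or.inr (by injection h' with h''; omega)
          · exact Or.inl h'
      · exact Or.inr h' 

theorem addDefs_get?_preserve (ds : List Int) :
    ∀ (fd : PySem.Dict Int Int) (i u v : Int),
      fd.get? u = some v → (addDefs fd i ds).get? u = some v := by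
  induction ds with
  | nil => intro fd i u v h; exact h
  | cons d ds ih =>
      intro fd i u v h
      apply ih
      beta_reduce
      by_cases hc : PySem.Dict.contains fd d = true
      · rw [if_pos hc]; exact h
      · rw [if_neg hc, PySem.Dict.get?_insert]
        split_ifs with he
        · exfalso
          rw [PySem.Dict.contains_eq_isSome_get?] at hc
          subst he
          rw [h] at hc
          simp at hc
        · exact h

theorem addDefs_get?_none (ds : List Int) :
    ∀ (fd : PySem.Dict Int Int) (i u : Int),
      (addDefs fd i ds).get? u = none ↔ fd.get? u = none ∧ u ∉ ds := by
  induction ds with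
  | nil => intro fd i u; simp [addDefs]
  | cons d ds ih =>
      intro fd i u
      have step : (addDefs fd i (d :: ds)).get? u
          = (addDefs (if PySem.Dict.contains fd d = true then fd else PySem.Dict.insert fd d i) i ds).get? u := rfl
      rw [step, ih]
      by_cases hc : PySem.Dict.contains fd d = true
      · rw [if_pos hc]
        rw [PySem.Dict.contains_eq_isSome_get?] at hc
        constructor
        · rintro ⟨h1, h2⟩
          refine ⟨h1, ?_⟩
          simp only [List.mem_cons, not_or]
          refine ⟨?_, h2⟩
          rintro rfl
          rw [h1] at hc; simp at hc
        · rintro ⟨h1, h2⟩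
          simp only [List.mem_cons, not_or] at h2
          exact ⟨h1, h2.2⟩
      · rw [if_neg hc, PySem.Dict.get?_insert]
        constructor
        · intro h
          split_ifs at h with he
          · simp at h
          · simp only [List.mem_cons, not_or]
            exact ⟨h.1, ⟨he, h.2⟩⟩
        · rintro ⟨h1, h2⟩
          simp only [List.mem_cons, not_or] at h2
          rw [if_neg h2.1]
          exact ⟨h1, h2.2⟩

theorem buildFdFrom_preserve (l : List (List (String × List Int))) :
    ∀ (fd : PySem.Dict Int Int) (i u v : Int),
      fd.get? u = some v → (buildFdFrom fd i l).get? u = some v := by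
  induction l with
  | nil => intro fd i u v h; exact h
  | cons it rest ih =>
      intro fd i u v h
      exact ih _ _ _ _ (addDefs_get?_preserve _ _ _ _ _ h)

theorem buildFdFrom_none (l : List (List (String × List Int))) :
    ∀ (fd : PySem.Dict Int Int) (i u : Int),
      (buildFdFrom fd i l).get? u = none ↔ fd.get? u = none ∧ u ∉ l.flatMap (fun it => defsOf it) := by
  induction l with
  | nil => intro fd i u; simp [buildFdFrom]
  | cons it rest ih =>
      intro fd i u
      have step : buildFdFrom fd i (it :: rest) = buildFdFrom (addDefs fd i (defsOf it)) (i + 1) rest := rfl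
      rw [step, ih, addDefs_get?_none]
      simp only [List.flatMap_cons, List.mem_append]
      tauto

theorem buildFdFrom_new_ge (l : List (List (String × List Int))) :
    ∀ (fd : PySem.Dict Int Int) (i u : Int), fd.get? u = none →
      (buildFdFrom fd i l).get? u = none ∨
        ∃ v, (buildFdFrom fd i l).get? u = some v ∧ i ≤ v := by
  induction l with
  | nil => intro fd i u h; exact Or.inl h
  | cons it rest ih =>
      intro fd i u h
      have step : buildFdFrom fd i (it :: rest) = buildFdFrom (addDefs fd i (defsOf it)) (i + 1) rest := rfl
      rw [step]
      cases haD : (addDefs fd i (defsOf it)).get? u with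
      | none =>
          rcases ih _ (i + 1) u haD with h' | ⟨v, hv, hvge⟩
          · exact Or.inl h'
          · exact Or.inr ⟨v, hv, by omega⟩
      | some v =>
          rcases addDefs_get?_some _ _ _ _ _ haD with h' | h'
          · rw [h] at h'; cases h'
          · subst h'
            exact Or.inr ⟨v, buildFdFrom_preserve _ _ _ _ _ haD, le_refl v⟩

theorem buildFdFrom_some_bound (l : List (List (String × List Int))) :
    ∀ (fd : PySem.Dict Int Int) (i u v : Int),
      (buildFdFrom fd i l).get? u = some v →
        fd.get? u = some v ∨ (i ≤ v ∧ v < i + l.length) := by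
  induction l with
  | nil => intro fd i u v h; exact Or.inl h
  | cons it rest ih =>
      intro fd i u v h
      have step : buildFdFrom fd i (it :: rest) = buildFdFrom (addDefs fd i (defsOf it)) (i + 1) rest := rfl
      rw [step] at h
      rcases ih _ (i + 1) u v h with h' | ⟨h1, h2⟩
      · rcases addDefs_get?_some _ _ _ _ _ h' with h'' | h''
        · exact Or.inl h''
        · subst h''
          refine Or.inr ⟨le_refl v, ?_⟩
          simp only [List.length_cons]
          push_cast
          omega
      · refine Or.inr ⟨by omega, ?_⟩
        simp only [List.length_cons] at *
        push_cast at *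
        omega

theorem buildFdFrom_append (pre : List (List (String × List Int))) :
    ∀ (rest : List (List (String × List Int))) (fd : PySem.Dict Int Int) (i : Int),
      buildFdFrom fd i (pre ++ rest) = buildFdFrom (buildFdFrom fd i pre) (i + pre.length) rest := by
  induction pre with
  | nil => intro rest fd i; simp [buildFdFrom]
  | cons it pre ih =>
      intro rest fd i
      have step : buildFdFrom fd i ((it :: pre) ++ rest)
          = buildFdFrom (addDefs fd i (defsOf it)) (i + 1) (pre ++ rest) := rfl
      rw [step, ih]
      have step2 : buildFdFrom fd i (it :: pre) = buildFdFrom (addDefs fd i (defsOf it)) (i + 1) pre := rfl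
      rw [step2]
      congr 1
      simp only [List.length_cons]
      push_cast
      omega

theorem cond_eq (pre rest : List (List (String × List Int))) (u : Int) :
    decide (PySem.Dict.getD (buildFdFrom PySem.Dict.empty 0 (pre ++ rest)) u ((pre ++ rest).length : Int) ≥ (pre.length : Int))
      = !PySem.Set.contains (PySem.Set.ofList (pre.flatMap (fun it => defsOf it))) u := by
  have hsplit : buildFdFrom PySem.Dict.empty 0 (pre ++ rest)
      = buildFdFrom (buildFdFrom PySem.Dict.empty 0 pre) ((pre.length : Int)) rest := by
    rw [buildFdFrom_append]
    congr 1
    omega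
  by_cases hu : u ∈ pre.flatMap (fun it => defsOf it)
  · have hne : (buildFdFrom PySem.Dict.empty 0 pre).get? u ≠ none := by
      intro h
      rw [buildFdFrom_none] at h
      exact h.2 hu
    obtain ⟨v, hv⟩ : ∃ v, (buildFdFrom PySem.Dict.empty 0 pre).get? u = some v := by
      cases h : (buildFdFrom PySem.Dict.empty 0 pre).get? u with
      | none => exact absurd h hne
      | some v => exact ⟨v, rfl⟩
    rcases buildFdFrom_some_bound pre _ 0 u v hv with h' | ⟨h1, h2⟩
    · rw [PySem.Dict.get?_empty] at h'; cases h'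
    have hfd : (buildFdFrom PySem.Dict.empty 0 (pre ++ rest)).get? u = some v := by
      rw [hsplit]
      exact buildFdFrom_preserve _ _ _ _ _ hv
    rw [PySem.Dict.getD_eq_get?_getD, hfd]
    have hcon : PySem.Set.contains (PySem.Set.ofList (pre.flatMap (fun it => defsOf it))) u = true := by
      rw [PySem.Set.contains_iff, PySem.Set.mem_ofList]
      exact hu
    rw [hcon]
    simp only [Option.getD_some, Bool.not_true, decide_eq_false_iff_not]
    omega
  · have hp : (buildFdFrom PySem.Dict.empty 0 pre).get? u = none := by
      rw [buildFdFrom_none]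
      exact ⟨PySem.Dict.get?_empty u, hu⟩
    have hcon : PySem.Set.contains (PySem.Set.ofList (pre.flatMap (fun it => defsOf it))) u = false := by
      rw [Bool.eq_false_iff]
      intro h
      rw [PySem.Set.contains_iff, PySem.Set.mem_ofList] at h
      exact hu h
    rw [hcon]
    simp only [Bool.not_false, decide_eq_true_eq]
    rcases buildFdFrom_new_ge rest _ (pre.length : Int) u hp with h' | ⟨v, hv, hvge⟩
    · rw [hsplit, PySem.Dict.getD_eq_get?_getD, h']
      simp only [Option.getD_none, List.length_append]
      push_cast
      omega
    · rw [hsplit, PySem.Dict.getD_eq_get?_getD, hv]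
      simpa using hvge

theorem selA_eq_filtB (rest : List (List (String × List Int))) :
    ∀ pre : List (List (String × List Int)),
      selA (PySem.Set.ofList (pre.flatMap (fun it => defsOf it))) rest
        = filtB (buildFdFrom PySem.Dict.empty 0 (pre ++ rest)) ((pre ++ rest).length : Int) (pre.length : Int) rest := by
  induction rest with
  | nil => intro pre; simp [selA, filtB]
  | cons it rest ih =>
      intro pre
      simp only [selA, filtB]
      congr 1
      · exact List.filter_congr (fun u _ => (cond_eq pre (it :: rest) u).symm)
      · have h := ih (pre ++ [it])
        rw [List.flatMap_append] at h
        simp only [List.flatMap_cons, List.flatMap_nil, List.append_nil] at h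
        rw [PySem.Set.ofList_append] at h
        rw [h]
        have harr : (pre ++ [it]) ++ rest = pre ++ it :: rest := by
          simp
        rw [harr]
        have hlen : (((pre ++ [it]).length : Int)) = (pre.length : Int) + 1 := by
          simp
        rw [hlen]

-- ===== VERDICT (by name: the statement is the Claim_ definition above) =====
theorem block_use_def_spec : Claim_equal_block_use_def := by
  unfold Claim_equal_block_use_def
  intro parsed _ _
  unfold Spec_block_use_def block_use_def block_use_def_alt
  have hfold := List.foldl_ext
    (fun (acc : PySem.Dict Int (List Int) × PySem.Dict Int (List Int)) bi =>
      let fin := bi.2.foldl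
        (fun (st : List Int × List Int × List Int) item =>
          let instDefs := defsOf item
          let instUses := usesOf item
          let uses' := instUses.foldl
            (fun us u => if PySem.Set.contains st.1 u then us else PySem.Set.add us u) st.2.2
          let sd := instDefs.foldl
            (fun (p : List Int × List Int) d => (PySem.Set.add p.1 d, PySem.Set.add p.2 d))
            (st.1, st.2.1)
          (sd.1, sd.2, uses'))
        (([] : List Int), ([] : List Int), ([] : List Int))
      (PySem.Dict.insert acc.1 bi.1 fin.2.1, PySem.Dict.insert acc.2 bi.1 fin.2.2))
    (fun (acc : PySem.Dict Int (List Int) × PySem.Dict Int (List Int)) bi =>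
      let ins := bi.2
      let flatDefs := ins.flatMap (fun it => defsOf it)
      let firstDef := (PySem.List.enumerate ins).foldl
        (fun (fd : PySem.Dict Int Int) p =>
          (defsOf p.2).foldl
            (fun fd d => if PySem.Dict.contains fd d then fd else PySem.Dict.insert fd d p.1) fd)
        PySem.Dict.empty
      let n : Int := ins.length
      (PySem.Dict.insert acc.1 bi.1 (PySem.Set.ofList flatDefs),
       PySem.Dict.insert acc.2 bi.1 (PySem.Set.ofList
         ((PySem.List.enumerate ins).flatMap (fun p =>
           (usesOf p.2).filter (fun u => decide (PySem.Dict.getD firstDef u n ≥ p.1)))))))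
    (PySem.Dict.empty, PySem.Dict.empty) (l := parsed) ?_
  · rw [hfold]
  · intro acc bi _
    dsimp only
    rw [innerA_eq, enum_foldl_eq_buildFdFrom, enum_flatMap_eq_filtB]
    have hsel := selA_eq_filtB bi.2 []
    simp only [List.flatMap_nil, PySem.Set.ofList_nil, List.nil_append, List.length_nil,
      Nat.cast_zero] at hsel
    rw [PySem.Set.update_nil_left, PySem.Set.update_nil_left, hsel]
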